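-- pv_equiv track=rewrite | github.com/joshuamnewberry/Joshua_Program_Database | School/MTH 225/CodingAssignment4.py | setToBit
-- ===== SOURCE A (Python) =====
-- def setToBit(lst:list, n:int) -> list:
--     # Create a new list
--     bit = []
--     # Loop from 0 to n
--     for i in range(0, n):
--         # If i-1 is in the list add a 1 to the bit string
--         if i+1 in lst:
--             bit.append(1)
--         # Otherwise add a 0 to the bit string
--         else:
--             bit.append(0)
--     # Return the bit string
--     return bit
-- ===== SOURCE B (Python) =====
-- def setToBit(lst: list, n: int) -> list:
--     # Scatter membership into a pre-initialised table in one pass over lst.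
--     bit = [0] * max(n, 0)
--     for x in lst:
--         if 1 <= x <= n:
--             bit[x - 1] = 1
--     return bit
-- ===== Notes on version B (the rewrite author's own statement) =====
-- stated objective: faster
-- what changed: Instead of scanning lst once per output index (membership test inside a range loop), B allocates [0]*n and makes a single pass over lst, setting bit[x-1]=1 for each in-range x.
import Mathlib
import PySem

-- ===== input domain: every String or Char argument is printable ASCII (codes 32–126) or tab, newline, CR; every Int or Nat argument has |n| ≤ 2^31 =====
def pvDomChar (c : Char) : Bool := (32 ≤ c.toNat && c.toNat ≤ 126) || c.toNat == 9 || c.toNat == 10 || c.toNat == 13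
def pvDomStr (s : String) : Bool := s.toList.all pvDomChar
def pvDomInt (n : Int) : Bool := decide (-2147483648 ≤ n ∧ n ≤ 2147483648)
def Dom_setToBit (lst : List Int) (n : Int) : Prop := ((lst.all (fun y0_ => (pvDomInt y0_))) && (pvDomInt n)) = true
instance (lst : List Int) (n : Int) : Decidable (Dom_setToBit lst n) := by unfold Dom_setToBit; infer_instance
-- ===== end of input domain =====

-- B replaces A's per-index membership scan with one scatter pass over lst into a [0]*n table (asymptotically faster).

-- ===== PORT A =====
def setToBit (lst : List Int) (n : Int) : List Int :=
  (PySem.List.pyRange 0 n 1).foldl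
    (fun bit i => bit ++ [if i + 1 ∈ lst then (1 : Int) else 0]) []

-- ===== PORT B =====
def setToBit_alt (lst : List Int) (n : Int) : List Int :=
  lst.foldl
    (fun bit x => if 1 ≤ x ∧ x ≤ n then bit.set (x - 1).toNat 1 else bit)
    (List.replicate n.toNat (0 : Int))

-- ===== PRECONDITION & SPEC =====
def Spec_setToBit (lst : List Int) (n : Int) (out : List Int) : Prop := out = setToBit_alt lst n
instance (lst : List Int) (n : Int) (out : List Int) : Decidable (Spec_setToBit lst n out) := by unfold Spec_setToBit; infer_instance

-- ===== CLAIM (what is proved, stated in full; the proofs are below) =====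
def Claim_equal_setToBit : Prop := ∀ (lst : List Int) (n : Int), Dom_setToBit lst n → Spec_setToBit lst n (setToBit lst n)

-- ===== LEMMAS AND PROOFS =====

/-- A's append-fold is the map over the range. -/
theorem foldl_append_map {α β : Type} (g : α → β) :
    ∀ (l : List α) (acc : List β),
      l.foldl (fun b i => b ++ [g i]) acc = acc ++ l.map g := by
  intro l
  induction l with
  | nil => simp
  | cons x xs ih => intro acc; simp [List.foldl_cons, ih]

theorem setToBit_eq_map (lst : List Int) (n : Int) :
    setToBit lst n
      = (List.range n.toNat).map
          (fun k : Nat => if ((k : Int) + 1) ∈ lst then (1 : Int) else 0) := by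
  unfold setToBit
  rw [foldl_append_map, PySem.List.pyRange_one, List.map_map]
  simp only [List.nil_append, sub_zero]
  refine List.map_congr_left ?_
  intro k _
  simp

/-- Length invariant of B's scatter fold. -/
theorem alt_length (n : Int) :
    ∀ (lst bit : List Int),
      (lst.foldl
        (fun bit x => if 1 ≤ x ∧ x ≤ n then bit.set (x - 1).toNat 1 else bit)
        bit).length = bit.length := by
  intro lst
  induction lst with
  | nil => simp
  | cons x xs ih =>
      intro bit
      simp only [List.foldl_cons]
      rw [ih]
      split <;> simp

/-- Element invariant of B's scatter fold. -/
theorem alt_getElem (n : Int) :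
    ∀ (lst bit : List Int) (k : Nat) (hk : k < bit.length),
      (lst.foldl
        (fun bit x => if 1 ≤ x ∧ x ≤ n then bit.set (x - 1).toNat 1 else bit)
        bit)[k]'(by rw [alt_length]; exact hk)
      = if ((k : Int) + 1 ∈ lst ∧ (k : Int) + 1 ≤ n) then 1 else bit[k] := by
  intro lst
  induction lst with
  | nil => simp
  | cons x xs ih =>
      intro bit k hk
      simp only [List.foldl_cons]
      by_cases hx : 1 ≤ x ∧ x ≤ n
      · simp only [if_pos hx]
        rw [ih _ k (by simpa using hk)]
        by_cases hmem : (k : Int) + 1 ∈ xs ∧ (k : Int) + 1 ≤ n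
        · rw [if_pos hmem, if_pos ⟨List.mem_cons_of_mem _ hmem.1, hmem.2⟩]
        · by_cases heq : x = (k : Int) + 1
          · have hkn : (k : Int) + 1 ≤ n := heq ▸ hx.2
            rw [if_neg hmem, if_pos ⟨by simp [heq], hkn⟩]
            have hik : (x - 1).toNat = k := by omega
            subst hik
            simp
          · rw [if_neg hmem]
            have hne : (x - 1).toNat ≠ k := by omega
            rw [List.getElem_set_ne hne]
            by_cases hc : (k : Int) + 1 ∈ x :: xs ∧ (k : Int) + 1 ≤ n
            · exact absurd ⟨(List.mem_cons.mp hc.1).resolve_left (by omega), hc.2⟩ hmem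
            · rw [if_neg hc]
      · simp only [if_neg hx]
        rw [ih _ k hk]
        by_cases hmem : (k : Int) + 1 ∈ xs ∧ (k : Int) + 1 ≤ n
        · rw [if_pos hmem, if_pos ⟨List.mem_cons_of_mem _ hmem.1, hmem.2⟩]
        · rw [if_neg hmem]
          by_cases hc : (k : Int) + 1 ∈ x :: xs ∧ (k : Int) + 1 ≤ n
          · obtain ⟨hc1, hc2⟩ := hc
            rcases List.mem_cons.mp hc1 with h | h
            · exact absurd (⟨by omega, by omega⟩ : 1 ≤ x ∧ x ≤ n) hx
            · exact absurd ⟨h, hc2⟩ hmem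
          · rw [if_neg hc]

-- ===== VERDICT (by name: the statement is the Claim_ definition above) =====
theorem setToBit_spec : Claim_equal_setToBit := by
  intro lst n _
  unfold Spec_setToBit setToBit_alt
  rw [setToBit_eq_map]
  apply List.ext_getElem
  · rw [alt_length]; simp
  · intro k hk1 hk2
    have hkn : k < n.toNat := by simpa using hk1
    rw [alt_getElem n lst _ k (by simpa using hkn)]
    simp only [List.getElem_map, List.getElem_range, List.getElem_replicate]
    have hle : ((k : Int) + 1 ≤ n) := by omega
    by_cases hmem : (k : Int) + 1 ∈ lst
    · rw [if_pos hmem, if_pos ⟨hmem, hle⟩]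
    · rw [if_neg hmem, if_neg (by tauto)]
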